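-- pv_equiv track=rewrite | github.com/synsypa/synsypa_chat_bot | 3a_train_model_keras.py | ids_to_sentences
-- ===== SOURCE A (Python) =====
-- def ids_to_sentences(ids, corpus):
--     end_index = corpus.index('<END>')
--     filler_index = corpus.index('<FILL>')
--     full_str = ""
--     resp_list=[]
--     for num in ids:
--         if (num[0] == end_index or num[0] == filler_index):
--             resp_list.append(full_str)
--             full_str = ""
--         else:
--             full_str = full_str + corpus[num[0]] + " "
--     if full_str:
--         resp_list.append(full_str)
--     resp_list = [i for i in resp_list if i]
--     return resp_list
-- ===== SOURCE B (Python) =====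
-- def ids_to_sentences(ids, corpus):
--     end_index = corpus.index('<END>')
--     filler_index = corpus.index('<FILL>')
--     groups = []
--     cur = []
--     for num in ids:
--         if num[0] == end_index or num[0] == filler_index:
--             groups.append(cur)
--             cur = []
--         else:
--             cur.append(num)
--     groups.append(cur)
--     sentences = [''.join(corpus[n[0]] + ' ' for n in g) for g in groups]
--     return [s for s in sentences if s]
-- ===== Notes on version B (the rewrite author's own statement) =====
-- stated objective: alternative
-- what changed: B first partitions the id list into terminator-delimited groups, then renders each group to a sentence and keeps the non-empty ones, instead of A's single interleaved string/list accumulator.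
import Mathlib
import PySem

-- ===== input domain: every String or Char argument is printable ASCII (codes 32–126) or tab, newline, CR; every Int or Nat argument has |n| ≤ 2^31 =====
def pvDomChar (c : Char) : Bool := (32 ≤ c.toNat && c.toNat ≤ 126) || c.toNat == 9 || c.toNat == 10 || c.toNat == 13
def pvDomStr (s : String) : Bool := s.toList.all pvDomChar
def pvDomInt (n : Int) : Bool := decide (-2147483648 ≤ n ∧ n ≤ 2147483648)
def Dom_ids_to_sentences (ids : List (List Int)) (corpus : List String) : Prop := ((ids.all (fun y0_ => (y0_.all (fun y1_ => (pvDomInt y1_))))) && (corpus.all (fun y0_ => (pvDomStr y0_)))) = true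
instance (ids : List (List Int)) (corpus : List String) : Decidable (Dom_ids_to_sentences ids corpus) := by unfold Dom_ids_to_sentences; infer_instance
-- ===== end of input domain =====

-- B splits ids into terminator-delimited groups first and then renders each group, instead of
-- A's single interleaved string/list accumulator; same cost, different decomposition ('alternative').

-- ===== PORT A =====
-- Port of A: one fold carrying (full_str, resp_list).
-- num[0] is ported as num.headI: Pre_ guarantees num ≠ [] (Python raises IndexError otherwise);
-- corpus.index ported as index? with .getD 0: Pre_ guarantees '<END>'/'<FILL>' ∈ corpus (else ValueError);
-- corpus[num[0]] as pyGet? (negative-index wraparound) with .getD "": Pre_ guarantees it is in range.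
def ids_to_sentences (ids : List (List Int)) (corpus : List String) : List String :=
  let end_index : Int := ((PySem.List.index? corpus "<END>").getD 0 : Nat)
  let filler_index : Int := ((PySem.List.index? corpus "<FILL>").getD 0 : Nat)
  let st := ids.foldl (fun (st : String × List String) num =>
    if num.headI = end_index ∨ num.headI = filler_index then
      ("", st.2 ++ [st.1])
    else
      (st.1 ++ (PySem.List.pyGet? corpus num.headI).getD "" ++ " ", st.2)) ("", [])
  let resp_list := if st.1 ≠ "" then st.2 ++ [st.1] else st.2
  resp_list.filter (fun i => i ≠ "")

-- ===== PORT B =====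
-- ''.join(corpus[n[0]] + ' ' for n in g)
def pvSent (corpus : List String) (g : List (List Int)) : String :=
  g.foldl (fun acc num => acc ++ (PySem.List.pyGet? corpus num.headI).getD "" ++ " ") ""

-- Port of B: one fold building (groups, cur), then map pvSent and keep the non-empty strings.
def ids_to_sentences_alt (ids : List (List Int)) (corpus : List String) : List String :=
  let end_index : Int := ((PySem.List.index? corpus "<END>").getD 0 : Nat)
  let filler_index : Int := ((PySem.List.index? corpus "<FILL>").getD 0 : Nat)
  let st := ids.foldl (fun (st : List (List (List Int)) × List (List Int)) num =>
    if num.headI = end_index ∨ num.headI = filler_index then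
      (st.1 ++ [st.2], [])
    else
      (st.1, st.2 ++ [num])) ([], [])
  let groups := st.1 ++ [st.2]
  (groups.map (pvSent corpus)).filter (fun s => s ≠ "")

-- ===== PRECONDITION & SPEC =====
-- Exactly where A returns: '<END>'/'<FILL>' present (else ValueError), every num non-empty
-- (else IndexError on num[0]) and every num[0] a valid Python index into corpus (else IndexError;
-- indices equal to the terminator indices are in range anyway).
def Pre_ids_to_sentences (ids : List (List Int)) (corpus : List String) : Prop :=
  "<END>" ∈ corpus ∧ "<FILL>" ∈ corpus ∧
    ∀ num ∈ ids, num ≠ [] ∧ PySem.Raise.InRange corpus.length num.headI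
instance (ids : List (List Int)) (corpus : List String) : Decidable (Pre_ids_to_sentences ids corpus) := by unfold Pre_ids_to_sentences; infer_instance

def pvWitness_ids_to_sentences : List (List Int) × List String :=
  ([[2], [3], [0], [2]], ["<END>", "<FILL>", "hi", "there"])

def Spec_ids_to_sentences (ids : List (List Int)) (corpus : List String) (out : List String) : Prop := out = ids_to_sentences_alt ids corpus
instance (ids : List (List Int)) (corpus : List String) (out : List String) : Decidable (Spec_ids_to_sentences ids corpus out) := by unfold Spec_ids_to_sentences; infer_instance

-- ===== CLAIM (what is proved, stated in full; the proofs are below) =====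
def Claim_equal_ids_to_sentences : Prop := ∀ (ids : List (List Int)) (corpus : List String), Dom_ids_to_sentences ids corpus → Pre_ids_to_sentences ids corpus → Spec_ids_to_sentences ids corpus (ids_to_sentences ids corpus)

-- ===== LEMMAS AND PROOFS =====

-- A's fold state is the image of B's fold state under (pvSent, map pvSent).
lemma pv_loop_eq (corpus : List String) (e f : Int) :
    ∀ (ids : List (List Int)) (gs : List (List (List Int))) (cur : List (List Int)),
    ids.foldl (fun (st : String × List String) num =>
        if num.headI = e ∨ num.headI = f then ("", st.2 ++ [st.1])
        else (st.1 ++ (PySem.List.pyGet? corpus num.headI).getD "" ++ " ", st.2))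
      (pvSent corpus cur, gs.map (pvSent corpus))
    = (pvSent corpus (ids.foldl (fun (st : List (List (List Int)) × List (List Int)) num =>
          if num.headI = e ∨ num.headI = f then (st.1 ++ [st.2], [])
          else (st.1, st.2 ++ [num])) (gs, cur)).2,
       ((ids.foldl (fun (st : List (List (List Int)) × List (List Int)) num =>
          if num.headI = e ∨ num.headI = f then (st.1 ++ [st.2], [])
          else (st.1, st.2 ++ [num])) (gs, cur)).1).map (pvSent corpus)) := by
  intro ids
  induction ids with
  | nil => intro gs cur; rfl
  | cons num rest ih =>
    intro gs cur
    by_cases h : num.headI = e ∨ num.headI = f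
    · simp only [List.foldl_cons, if_pos h]
      have := ih (gs ++ [cur]) []
      simpa [pvSent] using this
    · simp only [List.foldl_cons, if_neg h]
      have hs : pvSent corpus (cur ++ [num])
          = pvSent corpus cur ++ (PySem.List.pyGet? corpus num.headI).getD "" ++ " " := by
        simp [pvSent, List.foldl_append]
      rw [← hs]
      exact ih gs (cur ++ [num])

-- A only appends full_str when non-empty, but the final filter makes that irrelevant.
lemma pv_filter_if (r : List String) (s : String) :
    (if s ≠ "" then r ++ [s] else r).filter (fun i => i ≠ "")
      = (r ++ [s]).filter (fun i => i ≠ "") := by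
  split_ifs with h
  · rfl
  · simp at h
    simp [h, List.filter_append]

-- ===== VERDICT (by name: the statement is the Claim_ definition above) =====
theorem ids_to_sentences_spec : Claim_equal_ids_to_sentences := by
  intro ids corpus _ _
  unfold Spec_ids_to_sentences ids_to_sentences ids_to_sentences_alt
  have h := pv_loop_eq corpus
      ((PySem.List.index? corpus "<END>").getD 0 : Nat)
      ((PySem.List.index? corpus "<FILL>").getD 0 : Nat) ids [] []
  simp only [List.map_nil] at h
  have h0 : pvSent corpus [] = "" := rfl
  rw [h0] at h
  simp only [h]
  rw [pv_filter_if]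
  simp [List.filter_append, List.map_append]
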